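-- pv_equiv track=rewrite | github.com/tradingstrategy-ai/trade-executor | tradeexecutor/strategy/machine_learning/model.py | _current_next
-- ===== SOURCE A (Python) =====
-- from typing import TypedDict, Protocol, Callable, TypeAlias, Iterable, Any
--
-- def _current_next(iterable: Iterable):
--     """Allow us to iterate current and next values simultaneously."""
--     it = iter(iterable)
--     cur = next(it, None)
--     if cur is None:
--         return
--     for nxt in it:
--         yield cur, nxt
--         cur = nxt
--     yield cur, None  # last item has no next
-- ===== SOURCE B (Python) =====
-- def _current_next(iterable):
--     """Allow us to iterate current and next values simultaneously."""
--     items = list(iterable)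
--     yield from zip(items, items[1:] + [None])
-- ===== Notes on version B (the rewrite author's own statement) =====
-- stated objective: idiomatic
-- what changed: Replaces the rolling-state streaming loop (cur/next handoff with a trailing yield) by materializing the list once and zipping it with its shifted-by-one slice padded with None; on an empty list zip naturally yields nothing, so no guard is needed.
import Mathlib
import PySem

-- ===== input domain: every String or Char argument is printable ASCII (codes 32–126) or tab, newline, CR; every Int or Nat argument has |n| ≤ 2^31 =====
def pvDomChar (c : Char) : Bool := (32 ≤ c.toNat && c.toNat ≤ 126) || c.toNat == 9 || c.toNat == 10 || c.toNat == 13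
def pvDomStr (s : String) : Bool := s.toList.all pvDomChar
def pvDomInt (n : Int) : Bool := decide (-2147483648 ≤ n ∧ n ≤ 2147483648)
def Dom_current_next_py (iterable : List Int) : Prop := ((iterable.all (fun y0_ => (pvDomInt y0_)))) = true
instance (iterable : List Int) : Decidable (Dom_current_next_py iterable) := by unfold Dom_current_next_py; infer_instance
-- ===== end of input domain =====

-- B replaces A's rolling-state streaming loop by a build-list-then-zip-with-shifted-slice pass (idiomatic; return value only — both are generators, compared as the list of yielded pairs).


-- ===== PORT A =====
-- the for-loop: yields (cur, nxt) for each nxt, handing cur along; trailing (cur, None)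
def currentNextLoopA (cur : Int) : List Int → List (Int × Option Int)
  | [] => [(cur, none)]
  | nxt :: rest => (cur, some nxt) :: currentNextLoopA nxt rest

def current_next_py (iterable : List Int) : List (Int × Option Int) :=
  match iterable with
  | [] => []            -- cur = next(it, None) is None → return
  | cur :: it => currentNextLoopA cur it

-- ===== PORT B =====
-- zip(items, items[1:] + [None]); zip on the empty list yields nothing by itself
def current_next_py_alt (iterable : List Int) : List (Int × Option Int) :=
  iterable.zip ((iterable.drop 1).map some ++ [none])

-- ===== PRECONDITION & SPEC =====
def Spec_current_next_py (iterable : List Int) (out : List (Int × Option Int)) : Prop := out = current_next_py_alt iterable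
instance (iterable : List Int) (out : List (Int × Option Int)) : Decidable (Spec_current_next_py iterable out) := by unfold Spec_current_next_py; infer_instance

-- ===== CLAIM (what is proved, stated in full; the proofs are below) =====
def Claim_equal_current_next_py : Prop := ∀ (iterable : List Int), Dom_current_next_py iterable → Spec_current_next_py iterable (current_next_py iterable)

-- ===== LEMMAS AND PROOFS =====
theorem currentNextLoopA_eq_zip (cur : Int) (rest : List Int) :
    currentNextLoopA cur rest = (cur :: rest).zip (rest.map some ++ [none]) := by
  induction rest generalizing cur with
  | nil => simp [currentNextLoopA]
  | cons n rs ih => simp [currentNextLoopA, ih n]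

-- ===== VERDICT (by name: the statement is the Claim_ definition above) =====
theorem current_next_py_spec : Claim_equal_current_next_py := by
  intro iterable _
  unfold Spec_current_next_py current_next_py current_next_py_alt
  match iterable with
  | [] => rfl
  | cur :: it => simp [currentNextLoopA_eq_zip]
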